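-- pv_equiv track=rewrite | github.com/super-quantum/rmsynth | src/api/python/rmsynth/decoders.py | _gf2_matmul_rows
-- ===== SOURCE A (Python) =====
-- from typing import List, Tuple, Optional
--
-- def _gf2_matmul_rows(A_rows: List[int], B_rows: List[int], n: int) -> List[int]:
--     """
--     C = A*B over GF(2), all in row-bitmask form.
--
--     Row i of C is the XOR of rows of B selected by 1-bits in row i of A.
--     """
--     C = [0] * n
--     for i in range(n):
--         acc = 0
--         x = A_rows[i]
--         while x:
--             lsb = x & -x
--             k = (lsb.bit_length() - 1)
--             acc ^= B_rows[k]
--             x ^= lsb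
--         C[i] = acc
--     return C
-- ===== SOURCE B (Python) =====
-- def _gf2_matmul_rows(A_rows, B_rows, n):
--     """C = A*B over GF(2), computed column-major: for each bit position k used by
--     any A-row, scatter B_rows[k] into every output row whose A-row has bit k set."""
--     rows = [A_rows[i] for i in range(n)]
--     C = [0] * n
--     K = 0
--     for a in rows:
--         K = max(K, a.bit_length())
--     for k in range(K):
--         b = B_rows[k]
--         C = [c ^ b if (a >> k) & 1 else c for c, a in zip(C, rows)]
--     return C
-- ===== Notes on version B (the rewrite author's own statement) =====
-- stated objective: alternative
-- what changed: Replaced the per-row lsb-peeling gather (while-loop extracting x & -x) by a column-major scatter: one pass over the bit positions up to the maximal row bit-length that XORs B_rows[k] into every output row whose A-row has bit k set, rebuilding C functionally per column.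
import Mathlib
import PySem

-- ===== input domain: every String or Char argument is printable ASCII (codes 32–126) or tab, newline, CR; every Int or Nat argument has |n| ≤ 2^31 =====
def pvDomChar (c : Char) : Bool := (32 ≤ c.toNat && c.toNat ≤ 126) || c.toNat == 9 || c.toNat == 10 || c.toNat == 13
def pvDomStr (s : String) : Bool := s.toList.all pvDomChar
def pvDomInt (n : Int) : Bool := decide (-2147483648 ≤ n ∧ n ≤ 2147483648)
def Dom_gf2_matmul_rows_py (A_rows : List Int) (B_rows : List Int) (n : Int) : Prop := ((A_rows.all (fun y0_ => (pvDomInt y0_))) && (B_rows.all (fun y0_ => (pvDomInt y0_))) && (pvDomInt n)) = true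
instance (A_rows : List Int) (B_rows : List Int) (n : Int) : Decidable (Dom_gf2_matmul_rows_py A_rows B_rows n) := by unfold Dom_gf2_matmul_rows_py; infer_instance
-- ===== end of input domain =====

-- B replaces A's per-row lsb-peeling gather by a column-major scatter: for each bit position k
-- below the maximal row bit-length, XOR B_rows[k] into every output row whose A-row has bit k set
-- (objective: alternative — a genuinely different traversal of the same cost; not claimed faster).

-- ===== PORT A =====
-- the 'while x:' loop; the fuel argument x.natAbs only makes the recursion total
-- (each iteration strictly decreases a positive x; on negative x Python loops forever, excluded by Pre_)
def gf2RowLoop (B_rows : List Int) : Nat → Int → Int → Int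
  | 0, acc, _ => acc
  | fuel+1, acc, x =>
    if x = 0 then acc
    else
      let lsb := PySem.Int.band x (-x)
      let k : Nat := PySem.Int.bitLength lsb - 1
      gf2RowLoop B_rows fuel (PySem.Int.bxor acc (PySem.List.pyGetD B_rows (k : Int) 0)) (PySem.Int.bxor x lsb)

def gf2_matmul_rows_py (A_rows : List Int) (B_rows : List Int) (n : Int) : List Int :=
  (PySem.List.pyRange 0 n 1).map (fun i =>
    let x := PySem.List.pyGetD A_rows i 0
    gf2RowLoop B_rows x.natAbs 0 x)

-- ===== PORT B =====
def gf2_matmul_rows_py_alt (A_rows : List Int) (B_rows : List Int) (n : Int) : List Int :=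
  let rows := (PySem.List.pyRange 0 n 1).map (fun i => PySem.List.pyGetD A_rows i 0)
  let C0 : List Int := List.replicate n.toNat 0
  let K : Int := rows.foldl (fun K a => max K ((PySem.Int.bitLength a : Nat) : Int)) 0
  (PySem.List.pyRange 0 K 1).foldl
    (fun C k => (C.zip rows).map (fun ca =>
      if PySem.Int.band (ca.2 >>> (k.toNat : Int)) 1 ≠ 0 then PySem.Int.bxor ca.1 (PySem.List.pyGetD B_rows k 0) else ca.1))
    C0

-- ===== PRECONDITION & SPEC =====
-- Pre_ = exactly the inputs on which the Python A returns: n ≤ len(A_rows) (else IndexError on A_rows[i]),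
-- and every row actually read is nonnegative (negative rows make the while loop diverge) with all its
-- set bits below len(B_rows) (a higher set bit raises IndexError on B_rows[k]).
def Pre_gf2_matmul_rows_py (A_rows : List Int) (B_rows : List Int) (n : Int) : Prop :=
  n ≤ (A_rows.length : Int) ∧ ∀ a ∈ A_rows.take n.toNat, 0 ≤ a ∧ a < (2 : Int) ^ B_rows.length
instance (A_rows : List Int) (B_rows : List Int) (n : Int) : Decidable (Pre_gf2_matmul_rows_py A_rows B_rows n) := by unfold Pre_gf2_matmul_rows_py; infer_instance

def pvWitness_gf2_matmul_rows_py : List Int × List Int × Int := ([3, 1], [2, 3], 2)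

def Spec_gf2_matmul_rows_py (A_rows : List Int) (B_rows : List Int) (n : Int) (out : List Int) : Prop := out = gf2_matmul_rows_py_alt A_rows B_rows n
instance (A_rows : List Int) (B_rows : List Int) (n : Int) (out : List Int) : Decidable (Spec_gf2_matmul_rows_py A_rows B_rows n out) := by unfold Spec_gf2_matmul_rows_py; infer_instance

-- ===== CLAIM (what is proved, stated in full; the proofs are below) =====
def Claim_equal_gf2_matmul_rows_py : Prop := ∀ (A_rows : List Int) (B_rows : List Int) (n : Int), Dom_gf2_matmul_rows_py A_rows B_rows n → Pre_gf2_matmul_rows_py A_rows B_rows n → Spec_gf2_matmul_rows_py A_rows B_rows n (gf2_matmul_rows_py A_rows B_rows n)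

-- ===== LEMMAS AND PROOFS =====

theorem pv_bxor_eq_xor (a b : Int) : PySem.Int.bxor a b = Int.xor a b := by
  rcases a with m|m <;> rcases b with n|n <;>
    simp [PySem.Int.bxor, Int.xor, Int.negSucc_eq] <;> omega
theorem pv_bxor_assoc (a b c : Int) :
    PySem.Int.bxor (PySem.Int.bxor a b) c = PySem.Int.bxor a (PySem.Int.bxor b c) := by
  simp only [pv_bxor_eq_xor]
  rcases a with m|m <;> rcases b with n|n <;> rcases c with p|p <;>
    simp [Int.xor, Nat.xor_assoc]
theorem pv_bxor_zero_left (a : Int) : PySem.Int.bxor 0 a = a := by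
  rw [PySem.Int.bxor_comm]; exact PySem.Int.bxor_zero a
theorem pv_tb_succ (a c i : Nat) (hc : c < 2) : (2*a + c).testBit (i+1) = a.testBit i := by
  rw [Nat.testBit_succ]
  have h : (2*a + c)/2 = a := by omega
  rw [h]
theorem pv_tb_zero (a c : Nat) (hc : c < 2) : (2*a + c).testBit 0 = decide (c = 1) := by
  rw [Nat.testBit_zero]
  have h : (2*a + c) % 2 = c := by omega
  rw [h]
theorem pv_land_even_odd (a b : Nat) : (2*a) &&& (2*b+1) = 2*(a &&& b) := by
  apply Nat.eq_of_testBit_eq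
  intro i
  rcases i with _ | i
  · rw [Nat.testBit_land, show 2*a = 2*a+0 from rfl, show 2*(a&&&b) = 2*(a&&&b)+0 from rfl,
        pv_tb_zero a 0 (by omega), pv_tb_zero b 1 (by omega), pv_tb_zero (a&&&b) 0 (by omega)]
    simp
  · rw [Nat.testBit_land, show 2*a = 2*a+0 from rfl, show 2*(a&&&b) = 2*(a&&&b)+0 from rfl,
        pv_tb_succ a 0 i (by omega), pv_tb_succ b 1 i (by omega), pv_tb_succ (a&&&b) 0 i (by omega), Nat.testBit_land]
theorem pv_land_odd_even (a b : Nat) : (2*a+1) &&& (2*b) = 2*(a &&& b) := by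
  apply Nat.eq_of_testBit_eq
  intro i
  rcases i with _ | i
  · rw [Nat.testBit_land, show 2*b = 2*b+0 from rfl, show 2*(a&&&b) = 2*(a&&&b)+0 from rfl,
        pv_tb_zero a 1 (by omega), pv_tb_zero b 0 (by omega), pv_tb_zero (a&&&b) 0 (by omega)]
    simp
  · rw [Nat.testBit_land, show 2*b = 2*b+0 from rfl, show 2*(a&&&b) = 2*(a&&&b)+0 from rfl,
        pv_tb_succ a 1 i (by omega), pv_tb_succ b 0 i (by omega), pv_tb_succ (a&&&b) 0 i (by omega), Nat.testBit_land]
theorem pv_xor_even_even (a b : Nat) : (2*a) ^^^ (2*b) = 2*(a ^^^ b) := by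
  apply Nat.eq_of_testBit_eq
  intro i
  rcases i with _ | i
  · rw [Nat.testBit_xor, show 2*a = 2*a+0 from rfl, show 2*b = 2*b+0 from rfl, show 2*(a^^^b) = 2*(a^^^b)+0 from rfl,
        pv_tb_zero a 0 (by omega), pv_tb_zero b 0 (by omega), pv_tb_zero (a^^^b) 0 (by omega)]
    decide
  · rw [Nat.testBit_xor, show 2*a = 2*a+0 from rfl, show 2*b = 2*b+0 from rfl, show 2*(a^^^b) = 2*(a^^^b)+0 from rfl,
        pv_tb_succ a 0 i (by omega), pv_tb_succ b 0 i (by omega), pv_tb_succ (a^^^b) 0 i (by omega), Nat.testBit_xor]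
theorem pv_xor_odd_one (a : Nat) : (2*a+1) ^^^ 1 = 2*a := by
  apply Nat.eq_of_testBit_eq
  intro i
  rcases i with _ | i
  · rw [Nat.testBit_xor, show (1:Nat) = 2*0+1 from rfl, show 2*a = 2*a+0 from rfl,
        pv_tb_zero a 1 (by omega), pv_tb_zero 0 1 (by omega), pv_tb_zero a 0 (by omega)]
    decide
  · rw [Nat.testBit_xor, show (1:Nat) = 2*0+1 from rfl, show 2*a = 2*a+0 from rfl,
        pv_tb_succ a 1 i (by omega), pv_tb_succ 0 1 i (by omega), pv_tb_succ a 0 i (by omega)]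
    simp

theorem pv_lsb_core : ∀ m : Nat, m ≠ 0 →
    ∃ t, m - (m &&& (m-1)) = 2^t ∧ m.testBit t = true ∧ (∀ j, j < t → m.testBit j = false) ∧
      m &&& (m-1) = m ^^^ 2^t := by
  intro m
  induction m using Nat.strong_induction_on with
  | _ m IH =>
    intro hm
    rcases Nat.even_or_odd m with ⟨a, ha⟩ | ⟨a, ha⟩
    · -- m = 2*a, a ≠ 0
      have ha' : m = 2*a := by omega
      have ha0 : a ≠ 0 := by omega
      obtain ⟨t, h1, h2, h3, h4⟩ := IH a (by omega) ha0
      have hsub : a &&& (a-1) ≤ a := by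
        by_contra h
        have := Nat.two_pow_pos t
        omega
      have hml : m - 1 = 2*(a-1)+1 := by omega
      have hland : m &&& (m-1) = 2*(a &&& (a-1)) := by
        rw [hml, ha', pv_land_even_odd]
      refine ⟨t+1, ?_, ?_, ?_, ?_⟩
      · rw [hland, ha', pow_succ]
        omega
      · rw [ha', show 2*a = 2*a+0 from rfl, pv_tb_succ a 0 t (by omega)]
        exact h2
      · intro j hj
        rcases j with _ | j
        · rw [ha', show 2*a = 2*a+0 from rfl, pv_tb_zero a 0 (by omega)]
          decide
        · rw [ha', show 2*a = 2*a+0 from rfl, pv_tb_succ a 0 j (by omega)]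
          exact h3 j (by omega)
      · rw [hland, ha', pow_succ, show 2^t*2 = 2*2^t by ring, pv_xor_even_even, h4]
    · -- m = 2*a+1 : odd
      have ha' : m = 2*a+1 := by omega
      have hml : m - 1 = 2*a := by omega
      have hland : m &&& (m-1) = 2*a := by
        rw [hml, ha', pv_land_odd_even, Nat.and_self]
      refine ⟨0, ?_, ?_, ?_, ?_⟩
      · rw [hland]; omega
      · rw [ha', pv_tb_zero a 1 (by omega)]; decide
      · intro j hj; omega
      · rw [hland, pow_zero, ha', pv_xor_odd_one]

theorem pv_band_neg (m : Nat) (hm : m ≠ 0) :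
    PySem.Int.band (m : Int) (-(m : Int)) = ((m - (m &&& (m-1)) : Nat) : Int) := by
  have h1 : (0:Int) ≤ (m:Int) := by omega
  have h2 : ¬ (0:Int) ≤ -(m:Int) := by omega
  simp only [PySem.Int.band, h1, h2, if_true, if_false]
  have h3 : ((m:Int)).toNat = m := by omega
  have h4 : (-(-(m:Int)) - 1).toNat = m - 1 := by omega
  rw [h3, h4]

theorem pv_bitLength_two_pow (t : Nat) : PySem.Int.bitLength ((2^t : Nat) : Int) = t + 1 := by
  induction t with
  | zero =>
    rw [PySem.Int.bitLength_natCast (by norm_num),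
        show ((2^0/2 : Nat) : Int) = ((0:Nat):Int) by norm_num, PySem.Int.bitLength_natCast_zero]
  | succ t ih =>
    rw [PySem.Int.bitLength_natCast (Nat.two_pow_pos (t+1)), show 2^(t+1)/2 = 2^t by
      rw [pow_succ]; omega]
    omega

def pvColXor (B : List Int) (N : Nat) (m : Nat) : Int :=
  (List.range N).foldl (fun acc k => if m.testBit k then PySem.Int.bxor acc (B.getD k 0) else acc) 0

theorem pv_foldl_bits_zero (B : List Int) (n : Nat) (acc : Int) :
    (List.range n).foldl (fun acc k => if Nat.testBit 0 k then PySem.Int.bxor acc (B.getD k 0) else acc) acc = acc := by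
  rw [PySem.List.foldl_congr_mem (List.range n) _ (fun acc _ => acc) acc
      (by intro a x _; simp [Nat.zero_testBit])]
  exact PySem.List.foldl_ignore _ _

theorem pv_F_step (B : List Int) (m m' t : Nat) (ht : m.testBit t = true) (ht' : m'.testBit t = false)
    (hoth : ∀ j, j ≠ t → m'.testBit j = m.testBit j) :
    ∀ n, t < n → ∀ acc,
    (List.range n).foldl (fun acc k => if m.testBit k then PySem.Int.bxor acc (B.getD k 0) else acc) acc
      = PySem.Int.bxor ((List.range n).foldl (fun acc k => if m'.testBit k then PySem.Int.bxor acc (B.getD k 0) else acc) acc) (B.getD t 0) := by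
  intro n
  induction n with
  | zero => omega
  | succ n ih =>
    intro hlt acc
    rw [List.range_succ, List.foldl_append, List.foldl_append]
    simp only [List.foldl_cons, List.foldl_nil]
    rcases Nat.lt_or_ge t n with h | h
    · -- t < n : apply ih, bit n equal for m and m'
      rw [ih h acc, hoth n (by omega)]
      by_cases hb : m.testBit n
      · simp only [hb, if_true]
        rw [pv_bxor_assoc, pv_bxor_assoc, PySem.Int.bxor_comm (B.getD t 0) (B.getD n 0)]
      · rw [if_neg hb, if_neg hb]
    · -- t = n
      have htn : t = n := by omega
      subst htn
      have heq : (List.range t).foldl (fun acc k => if m.testBit k then PySem.Int.bxor acc (B.getD k 0) else acc) acc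
          = (List.range t).foldl (fun acc k => if m'.testBit k then PySem.Int.bxor acc (B.getD k 0) else acc) acc := by
        apply PySem.List.foldl_congr_mem
        intro a x hx
        rw [hoth x (by simp at hx; omega)]
      rw [heq, ht, ht']
      simp

theorem pv_loop_eq (B : List Int) : ∀ fuel m acc, m ≤ fuel → m < 2^B.length →
    gf2RowLoop B fuel acc (m : Int) = PySem.Int.bxor acc (pvColXor B B.length m) := by
  intro fuel
  induction fuel with
  | zero =>
    intro m acc hm _
    have : m = 0 := by omega
    subst this
    rw [show ((0:Nat):Int) = 0 by norm_num]
    simp only [gf2RowLoop]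
    rw [pvColXor, pv_foldl_bits_zero, PySem.Int.bxor_zero]
  | succ f ih =>
    intro m acc hm hlt
    by_cases hm0 : m = 0
    · subst hm0
      rw [show ((0:Nat):Int) = 0 by norm_num]
      simp only [gf2RowLoop, if_true]
      rw [pvColXor, pv_foldl_bits_zero, PySem.Int.bxor_zero]
    · obtain ⟨t, h1, h2, h3, h4⟩ := pv_lsb_core m hm0
      have hm'le : m &&& (m-1) ≤ m := by
        by_contra h
        have := Nat.two_pow_pos t
        omega
      have hm't : (m &&& (m-1)).testBit t = false := by
        rw [h4, Nat.testBit_xor, Nat.testBit_two_pow]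
        simp [h2]
      have hm'oth : ∀ j, j ≠ t → (m &&& (m-1)).testBit j = m.testBit j := by
        intro j hj
        rw [h4, Nat.testBit_xor, Nat.testBit_two_pow]
        simp [Ne.symm hj]
      have hm'lt : m &&& (m-1) < m :=
        Nat.lt_of_testBit t hm't h2 (fun j hj => hm'oth j (by omega))
      have htlen : t < B.length := by
        have h2t : 2^t ≤ m := by omega
        have := lt_of_le_of_lt h2t hlt
        exact (Nat.pow_lt_pow_iff_right (by omega)).mp this
      simp only [gf2RowLoop]
      rw [if_neg (by exact_mod_cast hm0)]
      rw [pv_band_neg m hm0, h1, pv_bitLength_two_pow t, Nat.add_sub_cancel]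
      rw [PySem.List.pyGetD_natCast]
      rw [PySem.Int.bxor_natCast]
      rw [show m ^^^ 2^t = m &&& (m-1) by rw [h4]]
      rw [ih (m &&& (m-1)) _ (by omega) (by omega)]
      have hcol : pvColXor B B.length m = PySem.Int.bxor (pvColXor B B.length (m &&& (m-1))) (B.getD t 0) := by
        rw [pvColXor, pvColXor]
        exact pv_F_step B m (m &&& (m-1)) t h2 hm't hm'oth B.length htlen 0
      rw [hcol, pv_bxor_assoc, PySem.Int.bxor_comm (B.getD t 0) _]

def pvGRow (L : List (Int × Int)) (a : Int) : Int :=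
  L.foldl (fun s kb => if PySem.Int.band (a >>> (kb.1.toNat : Int)) 1 ≠ 0 then PySem.Int.bxor s kb.2 else s) 0

theorem pv_gRow_extract (L : List (Int × Int)) (a : Int) : ∀ s : Int,
    L.foldl (fun s kb => if PySem.Int.band (a >>> (kb.1.toNat : Int)) 1 ≠ 0 then PySem.Int.bxor s kb.2 else s) s
      = PySem.Int.bxor s (pvGRow L a) := by
  induction L with
  | nil => intro s; rw [List.foldl_nil, pvGRow, List.foldl_nil, PySem.Int.bxor_zero]
  | cons kb L ih =>
    intro s
    have hr : pvGRow (kb :: L) a = PySem.Int.bxor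
        (if PySem.Int.band (a >>> (kb.1.toNat : Int)) 1 ≠ 0 then PySem.Int.bxor 0 kb.2 else 0) (pvGRow L a) := by
      rw [pvGRow, List.foldl_cons, ih]
    rw [List.foldl_cons, ih, hr]
    by_cases hp : PySem.Int.band (a >>> (kb.1.toNat : Int)) 1 ≠ 0
    · rw [if_pos hp, if_pos hp, pv_bxor_zero_left, pv_bxor_assoc]
    · rw [if_neg hp, if_neg hp, pv_bxor_zero_left]

theorem pv_scatter (rows : List Int) : ∀ (L : List (Int × Int)) (C : List Int), C.length = rows.length →
    L.foldl (fun C kb => (C.zip rows).map (fun ca =>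
        if PySem.Int.band (ca.2 >>> (kb.1.toNat : Int)) 1 ≠ 0 then PySem.Int.bxor ca.1 kb.2 else ca.1)) C
      = (C.zip rows).map (fun ca => PySem.Int.bxor ca.1 (pvGRow L ca.2)) := by
  intro L
  induction L with
  | nil =>
    intro C h
    rw [List.foldl_nil]
    have : (fun (ca : Int × Int) => PySem.Int.bxor ca.1 (pvGRow [] ca.2)) = (fun ca => ca.1) := by
      funext ca
      rw [pvGRow, List.foldl_nil, PySem.Int.bxor_zero]
    rw [this]
    exact (List.map_fst_zip (le_of_eq h)).symm
  | cons kb L ih =>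
    intro C h
    rw [List.foldl_cons]
    have hlen' : ((C.zip rows).map (fun ca =>
        if PySem.Int.band (ca.2 >>> (kb.1.toNat : Int)) 1 ≠ 0 then PySem.Int.bxor ca.1 kb.2 else ca.1)).length = rows.length := by
      simp [h]
    rw [ih _ hlen']
    apply List.ext_getElem
    · simp [h]
    · intro i hi1 hi2
      have hiC : i < C.length := by simp at hi1; omega
      have hir : i < rows.length := by omega
      simp only [List.getElem_map, List.getElem_zip]
      have hr : pvGRow (kb :: L) rows[i] = PySem.Int.bxor
          (if PySem.Int.band (rows[i] >>> (kb.1.toNat : Int)) 1 ≠ 0 then PySem.Int.bxor 0 kb.2 else 0)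
          (pvGRow L rows[i]) := by
        rw [pvGRow, List.foldl_cons, pv_gRow_extract]
      rw [hr]
      by_cases hp : PySem.Int.band (rows[i] >>> (kb.1.toNat : Int)) 1 ≠ 0
      · rw [if_pos hp, if_pos hp, pv_bxor_zero_left, pv_bxor_assoc]
      · rw [if_neg hp, if_neg hp, pv_bxor_zero_left]

theorem pv_test_iff (m k : Nat) : ((PySem.Int.band ((m:Int) >>> ((k:Nat):Int)) 1 ≠ 0) ↔ m.testBit k = true) := by
  rw [show (1:Int) = ((1:Nat):Int) by norm_num, Int.shiftRight_natCast, PySem.Int.band_natCast,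
      Nat.and_one_is_mod, Nat.shiftRight_eq_div_pow, Nat.testBit_eq_decide_div_mod_eq]
  simp only [ne_eq, Int.natCast_eq_zero, decide_eq_true_eq]
  omega

theorem pv_colXor_stable (B : List Int) (m N : Nat) (h : m < 2^N) :
    ∀ d, pvColXor B (N + d) m = pvColXor B N m := by
  intro d
  induction d with
  | zero => rfl
  | succ d ih =>
    rw [pvColXor, show N + (d+1) = (N+d) + 1 from rfl, List.range_succ, List.foldl_append,
        List.foldl_cons, List.foldl_nil,
        if_neg (by rw [Nat.testBit_lt_two_pow (lt_of_lt_of_le h (Nat.pow_le_pow_right (by omega) (by omega)))]; simp)]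
    exact ih

theorem pv_colXor_congr (B : List Int) (m N₁ N₂ : Nat) (h1 : m < 2^N₁) (h2 : m < 2^N₂) :
    pvColXor B N₁ m = pvColXor B N₂ m := by
  rcases Nat.le_total N₁ N₂ with h | h
  · obtain ⟨d, rfl⟩ := Nat.exists_eq_add_of_le h
    exact (pv_colXor_stable B m N₁ h1 d).symm
  · obtain ⟨d, rfl⟩ := Nat.exists_eq_add_of_le h
    exact pv_colXor_stable B m N₂ h2 d

theorem pv_gRow_pyRange (B : List Int) (m N : Nat) :
    pvGRow ((PySem.List.pyRange 0 (N : Int) 1).map (fun k => (k, PySem.List.pyGetD B k 0))) ((m : Nat) : Int)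
      = pvColXor B N m := by
  rw [pvGRow, List.foldl_map, PySem.List.pyRange_one, List.foldl_map, pvColXor]
  have hn : ((N : Int) - 0).toNat = N := by omega
  rw [hn]
  apply PySem.List.foldl_congr_mem
  intro acc k hk
  simp only [zero_add, Int.toNat_natCast, PySem.List.pyGetD_natCast]
  by_cases hb : m.testBit k = true
  · rw [if_pos ((pv_test_iff m k).mpr hb), if_pos hb]
  · rw [if_neg (fun hc => hb ((pv_test_iff m k).mp hc)), if_neg hb]

-- ===== VERDICT (by name: the statement is the Claim_ definition above) =====
theorem gf2_matmul_rows_py_spec : Claim_equal_gf2_matmul_rows_py := by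
  intro A B n _ hpre
  obtain ⟨hn, hrows⟩ := hpre
  unfold Spec_gf2_matmul_rows_py gf2_matmul_rows_py gf2_matmul_rows_py_alt
  simp only []
  -- abbreviations for B's locals
  have hKfold : (((PySem.List.pyRange 0 n 1).map (fun i => PySem.List.pyGetD A i 0)).foldl
        (fun K a => max K ((PySem.Int.bitLength a : Nat) : Int)) 0)
      = (((PySem.List.pyRange 0 n 1).map (fun i => PySem.List.pyGetD A i 0)).map
          (fun a => ((PySem.Int.bitLength a : Nat) : Int))).foldl max 0 := by
    simp only [List.foldl_map]
  obtain ⟨hK0, hKmem⟩ := PySem.List.le_foldl_max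
    ((((PySem.List.pyRange 0 n 1).map (fun i => PySem.List.pyGetD A i 0)).map
        (fun a => ((PySem.Int.bitLength a : Nat) : Int)))) 0
  rw [hKfold]
  have hKnn : (0:Int) ≤ (((PySem.List.pyRange 0 n 1).map (fun i => PySem.List.pyGetD A i 0)).map
      (fun a => ((PySem.Int.bitLength a : Nat) : Int))).foldl max 0 := hK0
  have hKcast : ((((((PySem.List.pyRange 0 n 1).map (fun i => PySem.List.pyGetD A i 0)).map
      (fun a => ((PySem.Int.bitLength a : Nat) : Int))).foldl max 0).toNat : Nat) : Int)
      = (((PySem.List.pyRange 0 n 1).map (fun i => PySem.List.pyGetD A i 0)).map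
      (fun a => ((PySem.Int.bitLength a : Nat) : Int))).foldl max 0 := by omega
  rw [← hKcast]
  have hfold : ∀ (KN : Nat) (C0 : List Int),
      (PySem.List.pyRange 0 ((KN : Nat) : Int) 1).foldl
        (fun C k => (C.zip ((PySem.List.pyRange 0 n 1).map (fun i => PySem.List.pyGetD A i 0))).map (fun ca =>
          if PySem.Int.band (ca.2 >>> (k.toNat : Int)) 1 ≠ 0 then PySem.Int.bxor ca.1 (PySem.List.pyGetD B k 0) else ca.1)) C0
      = ((PySem.List.pyRange 0 ((KN : Nat) : Int) 1).map (fun k => (k, PySem.List.pyGetD B k 0))).foldl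
        (fun C kb => (C.zip ((PySem.List.pyRange 0 n 1).map (fun i => PySem.List.pyGetD A i 0))).map (fun ca =>
          if PySem.Int.band (ca.2 >>> (kb.1.toNat : Int)) 1 ≠ 0 then PySem.Int.bxor ca.1 kb.2 else ca.1)) C0 := by
    intro KN C0
    rw [List.foldl_map]
  rw [hfold, pv_scatter _ _ _ (by simp [PySem.List.length_pyRange_one])]
  apply List.ext_getElem
  · simp [PySem.List.length_pyRange_one]
  · intro i hi1 hi2
    have hiN : i < n.toNat := by
      simp [PySem.List.length_pyRange_one] at hi1; omega
    have hiA : i < A.length := by omega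
    simp only [List.getElem_map, List.getElem_zip, PySem.List.getElem_pyRange_one,
      List.getElem_replicate, zero_add]
    have hget : PySem.List.pyGetD A ((i : Nat) : Int) 0 = A[i] := by
      rw [PySem.List.pyGetD_natCast, List.getD_eq_getElem?_getD, List.getElem?_eq_getElem hiA]
      rfl
    rw [hget]
    have hmem : A[i] ∈ A.take n.toNat := by
      have : (A.take n.toNat)[i]'(by simp; omega) = A[i] := List.getElem_take
      exact this ▸ List.getElem_mem _
    obtain ⟨ha0, halt⟩ := hrows A[i] hmem
    have hcast : A[i] = ((A[i].toNat : Nat) : Int) := by omega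
    have hlt2 : A[i].toNat < 2 ^ B.length := by
      have h2 : ((2 ^ B.length : Nat) : Int) = (2:Int) ^ B.length := by push_cast; ring
      omega
    -- A[i] is one of B's rows, so its bitLength is bounded by the fold maximum
    have hrowmem : A[i] ∈ (PySem.List.pyRange 0 n 1).map (fun i => PySem.List.pyGetD A i 0) := by
      rw [← hget]
      apply List.mem_map_of_mem
      rw [PySem.List.mem_pyRange_one]
      omega
    have hbl : ((PySem.Int.bitLength A[i] : Nat) : Int)
        ≤ (((PySem.List.pyRange 0 n 1).map (fun i => PySem.List.pyGetD A i 0)).map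
            (fun a => ((PySem.Int.bitLength a : Nat) : Int))).foldl max 0 :=
      hKmem _ (List.mem_map_of_mem hrowmem)
    have hltK : A[i].toNat < 2 ^ ((((PySem.List.pyRange 0 n 1).map (fun i => PySem.List.pyGetD A i 0)).map
        (fun a => ((PySem.Int.bitLength a : Nat) : Int))).foldl max 0).toNat := by
      have h1 : A[i].natAbs < 2 ^ PySem.Int.bitLength A[i] := PySem.Int.lt_two_pow_bitLength A[i]
      have h2 : PySem.Int.bitLength A[i] ≤ ((((PySem.List.pyRange 0 n 1).map (fun i => PySem.List.pyGetD A i 0)).map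
          (fun a => ((PySem.Int.bitLength a : Nat) : Int))).foldl max 0).toNat := by omega
      calc A[i].toNat ≤ A[i].natAbs := by omega
        _ < 2 ^ PySem.Int.bitLength A[i] := h1
        _ ≤ _ := Nat.pow_le_pow_right (by omega) h2
    rw [hcast, Int.natAbs_natCast,
        pv_loop_eq B A[i].toNat A[i].toNat 0 (le_refl _) hlt2,
        pv_bxor_zero_left, pv_gRow_pyRange, pv_bxor_zero_left,
        pv_colXor_congr B A[i].toNat _ B.length hltK hlt2]
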